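-- pv_equiv track=rewrite | github.com/Reneechang17/Leetcode-Solution | 1716. Calculate Money in Leetcode Bank.py | totalMoney
-- ===== SOURCE A (Python) =====
-- def totalMoney(n: int) -> int:
--     full_weeks = n // 7
--     extra_days = n % 7
--
--     # k weeks' sum = 28 + 7 * (k-1)
--     # -> full_weeks * 28 + 7 * full_weeks * (full_weeks - 1) / 2
--     full_weeks_sum = full_weeks * 28 + 7 * full_weeks * (full_weeks - 1) // 2
--
--     extra_sum = 0
--     for i in range(1, extra_days + 1):
--         extra_sum += full_weeks + i
--
--     return full_weeks_sum + extra_sum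
-- ===== SOURCE B (Python) =====
-- def totalMoney(n: int) -> int:
--     # Pure closed form: w full weeks contribute 7*w*(w+7)/2 in total,
--     # the r leftover days are an arithmetic series with Gauss sum r*(2*w+r+1)/2.
--     w = n // 7
--     r = n % 7
--     return 7 * w * (w + 7) // 2 + r * (2 * w + r + 1) // 2
-- ===== Notes on version B (the rewrite author's own statement) =====
-- stated objective: simpler
-- what changed: Replaces A's per-week formula plus an explicit loop over the leftover days by a single loop-free closed form: the leftover-days loop becomes a Gauss arithmetic-series sum and the weeks part is algebraically merged into one quadratic expression.
import Mathlib
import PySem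

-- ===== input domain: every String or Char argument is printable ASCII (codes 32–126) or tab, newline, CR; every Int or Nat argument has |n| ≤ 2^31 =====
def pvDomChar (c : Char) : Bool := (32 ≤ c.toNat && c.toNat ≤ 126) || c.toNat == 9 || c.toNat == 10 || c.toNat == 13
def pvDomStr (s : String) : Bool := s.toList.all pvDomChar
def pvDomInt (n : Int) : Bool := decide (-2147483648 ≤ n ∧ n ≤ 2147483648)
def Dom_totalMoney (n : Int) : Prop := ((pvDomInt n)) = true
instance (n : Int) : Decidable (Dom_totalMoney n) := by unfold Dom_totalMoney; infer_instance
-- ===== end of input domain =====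

-- B replaces A's week formula plus leftover-days loop by one loop-free closed form (Gauss sum); simpler, same values on all integers.

-- ===== PORT A =====
def totalMoney (n : Int) : Int :=
  let full_weeks := PySem.Int.floordiv n 7
  let extra_days := PySem.Int.mod n 7
  let full_weeks_sum := full_weeks * 28 + PySem.Int.floordiv (7 * full_weeks * (full_weeks - 1)) 2
  let extra_sum := (PySem.List.pyRange 1 (extra_days + 1) 1).foldl (fun acc i => acc + (full_weeks + i)) 0
  full_weeks_sum + extra_sum

-- ===== PORT B =====
def totalMoney_alt (n : Int) : Int :=
  let w := PySem.Int.floordiv n 7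
  let r := PySem.Int.mod n 7
  PySem.Int.floordiv (7 * w * (w + 7)) 2 + PySem.Int.floordiv (r * (2 * w + r + 1)) 2

-- ===== PRECONDITION & SPEC =====
def Spec_totalMoney (n : Int) (out : Int) : Prop := out = totalMoney_alt n
instance (n : Int) (out : Int) : Decidable (Spec_totalMoney n out) := by unfold Spec_totalMoney; infer_instance

-- ===== CLAIM (what is proved, stated in full; the proofs are below) =====
def Claim_equal_totalMoney : Prop := ∀ (n : Int), Dom_totalMoney n → Spec_totalMoney n (totalMoney n)

-- ===== LEMMAS AND PROOFS =====

-- common closed form (doubled, to stay division-free): 2·total for w full weeks and r extra days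
def pvG (w r : Int) : Int := 56 * w + 7 * w * (w - 1) + 2 * r * w + r * (r + 1)

-- halving an even numerator
lemma double_floordiv_two (x : Int) (hd : (2 : Int) ∣ x) :
    2 * PySem.Int.floordiv x 2 = x := by
  have h1 := PySem.Int.floordiv_mul_add_mod x 2
  have h2 : PySem.Int.mod x 2 = 0 := (PySem.Int.mod_eq_zero_iff_dvd x 2).mpr hd
  omega

lemma even_mul_pred (w : Int) : (2 : Int) ∣ w * (w - 1) := by
  have := Int.even_mul_succ_self (w - 1)
  have heq : (w - 1) * (w - 1 + 1) = w * (w - 1) := by ring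
  rw [heq] at this
  obtain ⟨k, hk⟩ := this
  exact ⟨k, by linarith⟩

-- A's leftover-days loop, doubled
lemma loopA_double (fw : Int) (e : Nat) :
    2 * (PySem.List.pyRange 1 ((e : Int) + 1) 1).foldl (fun acc i => acc + (fw + i)) 0
      = 2 * e * fw + e * (e + 1) := by
  induction e with
  | zero => norm_num [PySem.List.pyRange_one_eq_nil]
  | succ e ih =>
      have hc : ((e + 1 : Nat) : Int) = (e : Int) + 1 := by push_cast; ring
      rw [hc, PySem.List.pyRange_one_succ_right (by omega : (1 : Int) ≤ (e : Int) + 1),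
        List.foldl_append]
      simp only [List.foldl]
      linear_combination ih

-- A, doubled, equals the closed form
lemma a_double (n : Int) :
    2 * totalMoney n = pvG (PySem.Int.floordiv n 7) (PySem.Int.mod n 7) := by
  unfold totalMoney
  have hrnn : 0 ≤ PySem.Int.mod n 7 := PySem.Int.mod_nonneg n (by norm_num)
  have he : (((PySem.Int.mod n 7).toNat : Int)) = PySem.Int.mod n 7 :=
    Int.toNat_of_nonneg hrnn
  rw [← he]
  have hloop := loopA_double (PySem.Int.floordiv n 7) (PySem.Int.mod n 7).toNat
  have hdvd : (2 : Int) ∣ 7 * PySem.Int.floordiv n 7 * (PySem.Int.floordiv n 7 - 1) := by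
    obtain ⟨k, hk⟩ := even_mul_pred (PySem.Int.floordiv n 7)
    exact ⟨7 * k, by linarith⟩
  have hq := double_floordiv_two _ hdvd
  unfold pvG
  linear_combination hq + hloop

-- B, doubled, equals the same closed form
lemma alt_double (n : Int) :
    2 * totalMoney_alt n = pvG (PySem.Int.floordiv n 7) (PySem.Int.mod n 7) := by
  unfold totalMoney_alt
  have hdvd1 : (2 : Int) ∣ 7 * PySem.Int.floordiv n 7 * (PySem.Int.floordiv n 7 + 7) := by
    obtain ⟨k, hk⟩ := even_mul_pred (PySem.Int.floordiv n 7 + 8)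
    exact ⟨7 * (k - 4 * PySem.Int.floordiv n 7 - 28), by linear_combination 7 * hk⟩
  have hdvd2 : (2 : Int) ∣
      PySem.Int.mod n 7 * (2 * PySem.Int.floordiv n 7 + PySem.Int.mod n 7 + 1) := by
    obtain ⟨k, hk⟩ := even_mul_pred (PySem.Int.mod n 7 + 1)
    exact ⟨k + PySem.Int.mod n 7 * PySem.Int.floordiv n 7, by linarith⟩
  have h1 := double_floordiv_two _ hdvd1
  have h2 := double_floordiv_two _ hdvd2
  unfold pvG
  linear_combination h1 + h2

-- ===== VERDICT (by name: the statement is the Claim_ definition above) =====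
theorem totalMoney_spec : Claim_equal_totalMoney := by
  intro n _
  unfold Spec_totalMoney
  have h1 := a_double n
  have h2 := alt_double n
  omega
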